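-- pv_equiv track=rewrite | github.com/Jgalanoii/cambrian-playbook | src/data/resolve.py | types_mergeable
-- ===== SOURCE A (Python) =====
-- MERGEABLE_TYPE_GROUPS = [
--     {"bank", "public_company", "bank_branch", "financial_services"},
--     {"credit_union", "public_company", "financial_services"},
--     {"healthcare_org", "nonprofit", "employer"},
--     {"money_services_business", "public_company", "financial_services"},
--     {"employer", "public_company", "government_contractor"},
-- ]
--
-- UNIVERSAL_TYPES = {"financial_services"}
--
-- def types_mergeable(type_a: str | None, type_b: str | None) -> bool:
--     if not type_a or not type_b or type_a == type_b:
--         return True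
--     if type_a in UNIVERSAL_TYPES or type_b in UNIVERSAL_TYPES:
--         return True
--     for group in MERGEABLE_TYPE_GROUPS:
--         if type_a in group and type_b in group:
--             return True
--     return False
-- ===== SOURCE B (Python) =====
-- MERGEABLE_TYPE_GROUPS = [
--     ["bank", "public_company", "bank_branch", "financial_services"],
--     ["credit_union", "public_company", "financial_services"],
--     ["healthcare_org", "nonprofit", "employer"],
--     ["money_services_business", "public_company", "financial_services"],
--     ["employer", "public_company", "government_contractor"],
-- ]
--
-- UNIVERSAL_TYPES = {"financial_services"}
--
-- # Precomputed at module load: the full relation as a flat set of ordered pairs.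
-- MERGEABLE_PAIRS = set()
-- for _g in MERGEABLE_TYPE_GROUPS:
--     for _x in _g:
--         for _y in _g:
--             if _x != _y:
--                 MERGEABLE_PAIRS.add((_x, _y))
--
-- def types_mergeable(type_a: str | None, type_b: str | None) -> bool:
--     # single boolean expression instead of an early-return chain; the group scan
--     # is replaced by one membership test in the precomputed pair relation
--     return (not type_a or not type_b or type_a == type_b
--             or type_a in UNIVERSAL_TYPES or type_b in UNIVERSAL_TYPES
--             or (type_a, type_b) in MERGEABLE_PAIRS)
-- ===== Notes on version B (the rewrite author's own statement) =====
-- stated objective: alternative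
-- what changed: B flattens the group list once at module load into a precomputed set of ordered mergeable pairs and answers each call with a single boolean disjunction ending in one pair-membership test, replacing A's early-return chain that scans every group per call.
import Mathlib
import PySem

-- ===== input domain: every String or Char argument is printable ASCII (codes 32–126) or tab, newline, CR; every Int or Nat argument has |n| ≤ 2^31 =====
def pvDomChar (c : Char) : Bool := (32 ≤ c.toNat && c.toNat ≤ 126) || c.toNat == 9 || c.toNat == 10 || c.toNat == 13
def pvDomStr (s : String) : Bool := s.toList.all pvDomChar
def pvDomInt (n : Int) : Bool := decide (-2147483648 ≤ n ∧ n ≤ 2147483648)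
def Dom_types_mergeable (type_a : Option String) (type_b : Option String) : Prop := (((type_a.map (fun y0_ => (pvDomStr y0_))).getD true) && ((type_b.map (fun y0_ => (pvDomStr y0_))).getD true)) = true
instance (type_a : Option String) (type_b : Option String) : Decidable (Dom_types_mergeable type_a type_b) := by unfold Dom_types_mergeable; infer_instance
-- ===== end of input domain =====

-- B flattens the group list, once at module load, into a set of ordered mergeable PAIRS and
-- answers with one boolean disjunction (a single pair-membership test instead of A's
-- early-return chain scanning every group per call); objective: alternative.

-- ===== PORT A =====
-- MERGEABLE_TYPE_GROUPS: a list of Python sets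
def aGroups : List (PySem.Set String) :=
  [PySem.Set.ofList ["bank", "public_company", "bank_branch", "financial_services"],
   PySem.Set.ofList ["credit_union", "public_company", "financial_services"],
   PySem.Set.ofList ["healthcare_org", "nonprofit", "employer"],
   PySem.Set.ofList ["money_services_business", "public_company", "financial_services"],
   PySem.Set.ofList ["employer", "public_company", "government_contractor"]]

def aUniversal : PySem.Set String := PySem.Set.ofList ["financial_services"]

-- Python truthiness of an Optional[str]: falsy iff None or ""
def aFalsy (o : Option String) : Bool := o == none || o == some ""

def types_mergeable (type_a : Option String) (type_b : Option String) : Bool :=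
  if aFalsy type_a || aFalsy type_b || type_a == type_b then true
  else if PySem.Set.contains aUniversal (type_a.getD "") || PySem.Set.contains aUniversal (type_b.getD "") then true
  else aGroups.any (fun g => PySem.Set.contains g (type_a.getD "") && PySem.Set.contains g (type_b.getD ""))

-- ===== PORT B =====
def bGroups : List (List String) :=
  [["bank", "public_company", "bank_branch", "financial_services"],
   ["credit_union", "public_company", "financial_services"],
   ["healthcare_org", "nonprofit", "employer"],
   ["money_services_business", "public_company", "financial_services"],
   ["employer", "public_company", "government_contractor"]]

def bUniversal : PySem.Set String := PySem.Set.ofList ["financial_services"]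

-- MERGEABLE_PAIRS, built at module load by the triple loop of Source B
def bPairs : PySem.Set (String × String) :=
  bGroups.foldl (fun s g =>
    g.foldl (fun s' x =>
      g.foldl (fun s'' y => if x == y then s'' else PySem.Set.add s'' (x, y)) s') s)
    PySem.Set.empty

def types_mergeable_alt (type_a : Option String) (type_b : Option String) : Bool :=
  ((type_a.getD "") == "") || ((type_b.getD "") == "") || type_a == type_b
    || PySem.Set.contains bUniversal (type_a.getD "")
    || PySem.Set.contains bUniversal (type_b.getD "")
    || PySem.Set.contains bPairs (type_a.getD "", type_b.getD "")

-- ===== PRECONDITION & SPEC =====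
def Spec_types_mergeable (type_a : Option String) (type_b : Option String) (out : Bool) : Prop := out = types_mergeable_alt type_a type_b
instance (type_a : Option String) (type_b : Option String) (out : Bool) : Decidable (Spec_types_mergeable type_a type_b out) := by unfold Spec_types_mergeable; infer_instance

-- ===== CLAIM (what is proved, stated in full; the proofs are below) =====
def Claim_equal_types_mergeable : Prop := ∀ (type_a : Option String) (type_b : Option String), Dom_types_mergeable type_a type_b → Spec_types_mergeable type_a type_b (types_mergeable type_a type_b)

-- ===== LEMMAS AND PROOFS =====

-- The triple fold evaluates to this literal pair set.
set_option maxRecDepth 4096 in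
lemma bPairs_eq : bPairs =
  [("bank", "public_company"), ("bank", "bank_branch"), ("bank", "financial_services"), ("public_company", "bank"),
   ("public_company", "bank_branch"), ("public_company", "financial_services"), ("bank_branch", "bank"),
   ("bank_branch", "public_company"), ("bank_branch", "financial_services"), ("financial_services", "bank"),
   ("financial_services", "public_company"), ("financial_services", "bank_branch"), ("credit_union", "public_company"),
   ("credit_union", "financial_services"), ("public_company", "credit_union"), ("financial_services", "credit_union"),
   ("healthcare_org", "nonprofit"), ("healthcare_org", "employer"), ("nonprofit", "healthcare_org"),
   ("nonprofit", "employer"), ("employer", "healthcare_org"), ("employer", "nonprofit"),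
   ("money_services_business", "public_company"), ("money_services_business", "financial_services"),
   ("public_company", "money_services_business"), ("financial_services", "money_services_business"),
   ("employer", "public_company"), ("employer", "government_contractor"), ("public_company", "employer"),
   ("public_company", "government_contractor"), ("government_contractor", "employer"),
   ("government_contractor", "public_company")] := by rfl

-- Python truthiness of the Optional[str] matches B's getD-"" test.
lemma falsy_eq (o : Option String) : aFalsy o = ((o.getD "") == "") := by
  cases o <;> simp [aFalsy]

-- For distinct type names, A's scan over the groups equals B's pair-membership test.
lemma loop_eq_pairs (s t : String) (h : ¬ s = t) :
  aGroups.any (fun g => PySem.Set.contains g s && PySem.Set.contains g t)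
    = PySem.Set.contains bPairs (s, t) := by
  rw [bPairs_eq]
  by_cases h1 : s = "bank"
  · subst h1; have ht : ¬ t = "bank" := fun e => h e.symm
    simp [aGroups, PySem.Set.ofList, PySem.Set.contains, PySem.Set.add, ht]
  ·
    by_cases h2 : s = "public_company"
    · subst h2; have ht : ¬ t = "public_company" := fun e => h e.symm
      simp [aGroups, PySem.Set.ofList, PySem.Set.contains, PySem.Set.add, ht];
      (rw [Bool.eq_iff_iff]; simp only [Bool.or_eq_true, decide_eq_true_eq]; tauto)
    ·
      by_cases h3 : s = "bank_branch"
      · subst h3; have ht : ¬ t = "bank_branch" := fun e => h e.symm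
        simp [aGroups, PySem.Set.ofList, PySem.Set.contains, PySem.Set.add, ht]
      ·
        by_cases h4 : s = "financial_services"
        · subst h4; have ht : ¬ t = "financial_services" := fun e => h e.symm
          simp [aGroups, PySem.Set.ofList, PySem.Set.contains, PySem.Set.add, ht];
          (rw [Bool.eq_iff_iff]; simp only [Bool.or_eq_true, decide_eq_true_eq]; tauto)
        ·
          by_cases h5 : s = "credit_union"
          · subst h5; have ht : ¬ t = "credit_union" := fun e => h e.symm
            simp [aGroups, PySem.Set.ofList, PySem.Set.contains, PySem.Set.add, ht]
          ·
            by_cases h6 : s = "healthcare_org"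
            · subst h6; have ht : ¬ t = "healthcare_org" := fun e => h e.symm
              simp [aGroups, PySem.Set.ofList, PySem.Set.contains, PySem.Set.add, ht]
            ·
              by_cases h7 : s = "nonprofit"
              · subst h7; have ht : ¬ t = "nonprofit" := fun e => h e.symm
                simp [aGroups, PySem.Set.ofList, PySem.Set.contains, PySem.Set.add, ht]
              ·
                by_cases h8 : s = "employer"
                · subst h8; have ht : ¬ t = "employer" := fun e => h e.symm
                  simp [aGroups, PySem.Set.ofList, PySem.Set.contains, PySem.Set.add, ht];
                  (rw [Bool.eq_iff_iff]; simp only [Bool.or_eq_true, decide_eq_true_eq]; tauto)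
                ·
                  by_cases h9 : s = "money_services_business"
                  · subst h9; have ht : ¬ t = "money_services_business" := fun e => h e.symm
                    simp [aGroups, PySem.Set.ofList, PySem.Set.contains, PySem.Set.add, ht]
                  ·
                    by_cases h10 : s = "government_contractor"
                    · subst h10; have ht : ¬ t = "government_contractor" := fun e => h e.symm
                      simp [aGroups, PySem.Set.ofList, PySem.Set.contains, PySem.Set.add, ht]
                    ·                      simp [aGroups, PySem.Set.ofList, PySem.Set.contains, PySem.Set.add, h1, h2, h3, h4, h5, h6, h7, h8, h9, h10]

-- ===== VERDICT (by name: the statement is the Claim_ definition above) =====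
set_option maxRecDepth 8192 in
theorem types_mergeable_spec : Claim_equal_types_mergeable := by
  intro a b _
  unfold Spec_types_mergeable types_mergeable types_mergeable_alt
  rw [show bUniversal = aUniversal from rfl, ← falsy_eq a, ← falsy_eq b]
  by_cases hg : (aFalsy a || aFalsy b || a == b) = true
  · rw [if_pos hg]
    simp only [Bool.or_eq_true, beq_iff_eq] at hg
    symm
    simp only [Bool.or_eq_true, beq_iff_eq]
    tauto
  · rw [if_neg hg]
    obtain ⟨⟨hgA, hgB⟩, hgE⟩ : (aFalsy a = false ∧ aFalsy b = false) ∧ (a == b) = false := by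
      simpa only [Bool.or_eq_true, not_or, Bool.not_eq_true] using hg
    by_cases hu : (PySem.Set.contains aUniversal (a.getD "") || PySem.Set.contains aUniversal (b.getD "")) = true
    · rw [if_pos hu]
      simp only [Bool.or_eq_true] at hu
      symm
      simp only [Bool.or_eq_true]
      tauto
    · rw [if_neg hu]
      have hu2 : PySem.Set.contains aUniversal (a.getD "") = false ∧ PySem.Set.contains aUniversal (b.getD "") = false := by
        simpa only [Bool.or_eq_true, not_or, Bool.not_eq_true] using hu
      rw [hgA, hgB, hgE, hu2.1, hu2.2]
      simp only [Bool.false_or]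
      apply loop_eq_pairs
      intro he
      rcases a with _ | s
      · exact absurd (by simp [aFalsy] : aFalsy none = true) (by simp [hgA])
      · rcases b with _ | t
        · exact absurd (by simp [aFalsy] : aFalsy none = true) (by simp [hgB])
        · simp only [Option.getD_some] at he
          exact absurd (by simp [he] : (some s == some t) = true) (by simp [hgE])
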